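-- pv_equiv track=rewrite | github.com/ObviouslyN0tMe/AdventOfCode | puzzle 12/puzzle 12.py | move_waypoint
-- ===== SOURCE A (Python) =====
-- directions = {"N": 0, "E": 1, "S": 2, "W": 3}
--
-- def move(direction, distance, position):
--     if direction == 0:
--         position["y"] += distance
--     elif direction == 1:
--         position["x"] += distance
--     elif direction == 2:
--         position["y"] -= distance
--     else:
--         position["x"] -= distance
--     return position
--
-- def move_waypoint(operator, value, position):
--     if operator == "L":
--         repeat = value // 90
--         while repeat > 0:
--             x = position["x"]
--             y = position["y"]
--             position["x"] = - y
--             position["y"] = x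
--             repeat -= 1
--     elif operator == "R":
--         repeat = value // 90
--         while repeat > 0:
--             x = position["x"]
--             y = position["y"]
--             position["x"] = y
--             position["y"] = - x
--             repeat -= 1
--     else:
--         direction = directions[operator]
--         position = move(direction, value, position)
--     return position
-- ===== SOURCE B (Python) =====
-- directions = {"N": 0, "E": 1, "S": 2, "W": 3}
--
--
-- def move(direction, distance, position):
--     if direction == 0:
--         position["y"] += distance
--     elif direction == 1:
--         position["x"] += distance
--     elif direction == 2:
--         position["y"] -= distance
--     else:
--         position["x"] -= distance
--     return position
--
--
-- def move_waypoint(operator, value, position):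
--     if operator in ("L", "R"):
--         repeat = value // 90
--         if repeat > 0:
--             # net rotation: L is one quarter-turn CCW, R one CW; only repeat % 4 matters
--             k = repeat % 4 if operator == "L" else -repeat % 4
--             x = position["x"]
--             y = position["y"]
--             if k == 1:
--                 position["x"] = -y
--                 position["y"] = x
--             elif k == 2:
--                 position["x"] = -x
--                 position["y"] = -y
--             elif k == 3:
--                 position["x"] = y
--                 position["y"] = -x
--         return position
--     direction = directions[operator]
--     return move(direction, value, position)
-- ===== Notes on version B (the rewrite author's own statement) =====
-- stated objective: faster
-- what changed: The per-90-degrees rotation loop is replaced by a single closed-form quarter-turn transform selected by repeat % 4 (R reuses the L table via -repeat % 4), guarded by repeat > 0; the translation branch is unchanged.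
import Mathlib
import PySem

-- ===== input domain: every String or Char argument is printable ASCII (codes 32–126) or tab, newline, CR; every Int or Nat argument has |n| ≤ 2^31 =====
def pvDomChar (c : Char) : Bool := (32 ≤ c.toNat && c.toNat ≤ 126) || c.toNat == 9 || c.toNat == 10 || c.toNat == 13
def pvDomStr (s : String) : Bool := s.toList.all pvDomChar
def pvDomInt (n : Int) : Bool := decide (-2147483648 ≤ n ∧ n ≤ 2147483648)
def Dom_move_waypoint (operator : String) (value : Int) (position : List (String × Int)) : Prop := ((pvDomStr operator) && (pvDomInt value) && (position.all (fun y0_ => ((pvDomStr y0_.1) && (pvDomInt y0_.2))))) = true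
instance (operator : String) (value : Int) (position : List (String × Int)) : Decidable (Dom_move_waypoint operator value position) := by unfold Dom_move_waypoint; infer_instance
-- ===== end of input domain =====

-- B replaces A's per-90-degrees rotation loop by one closed-form quarter-turn chosen by repeat % 4 (asymptotically faster for large values).
-- Both Pythons mutate the passed-in dict in place; the equivalence proved here is about the RETURN value (the mutations coincide anyway).

-- ===== PORT A =====
-- dict read d[k]: first match; Pre_ excludes the missing-key case (Python KeyError), where this defaults to 0
def pvGet (d : List (String × Int)) (k : String) : Int := (d.lookup k).getD 0

-- dict write d[k] = v: overwrite the first matching entry in place, else append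
def pvSet : List (String × Int) → String → Int → List (String × Int)
  | [], k, v => [(k, v)]
  | (k', v') :: t, k, v => if k' = k then (k, v) :: t else (k', v') :: pvSet t k v

def pvDirections : List (String × Int) := [("N", 0), ("E", 1), ("S", 2), ("W", 3)]

def pyMove (direction : Int) (distance : Int) (position : List (String × Int)) : List (String × Int) :=
  if direction = 0 then pvSet position "y" (pvGet position "y" + distance)
  else if direction = 1 then pvSet position "x" (pvGet position "x" + distance)
  else if direction = 2 then pvSet position "y" (pvGet position "y" - distance)
  else pvSet position "x" (pvGet position "x" - distance)

-- A's `while repeat > 0` loops, fuel = repeat.toNat (0 when repeat ≤ 0, exactly Python's guard)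
def pvWhileL : Nat → List (String × Int) → List (String × Int)
  | 0, d => d
  | n + 1, d =>
      let x := pvGet d "x"
      let y := pvGet d "y"
      pvWhileL n (pvSet (pvSet d "x" (-y)) "y" x)

def pvWhileR : Nat → List (String × Int) → List (String × Int)
  | 0, d => d
  | n + 1, d =>
      let x := pvGet d "x"
      let y := pvGet d "y"
      pvWhileR n (pvSet (pvSet d "x" y) "y" (-x))

def move_waypoint (operator : String) (value : Int) (position : List (String × Int)) : List (String × Int) :=
  if operator = "L" then pvWhileL (PySem.Int.floordiv value 90).toNat position
  else if operator = "R" then pvWhileR (PySem.Int.floordiv value 90).toNat position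
  else pyMove ((pvDirections.lookup operator).getD 0) value position  -- directions[operator]: KeyError excluded by Pre_

-- ===== PORT B =====
def move_waypoint_alt (operator : String) (value : Int) (position : List (String × Int)) : List (String × Int) :=
  if operator = "L" ∨ operator = "R" then
    let repeat' := PySem.Int.floordiv value 90
    if repeat' > 0 then
      let k := if operator = "L" then PySem.Int.mod repeat' 4 else PySem.Int.mod (-repeat') 4
      let x := pvGet position "x"
      let y := pvGet position "y"
      if k = 1 then pvSet (pvSet position "x" (-y)) "y" x
      else if k = 2 then pvSet (pvSet position "x" (-x)) "y" (-y)
      else if k = 3 then pvSet (pvSet position "x" y) "y" (-x)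
      else position
    else position
  else pyMove ((pvDirections.lookup operator).getD 0) value position

-- ===== PRECONDITION & SPEC =====
-- Pre_ excludes exactly the KeyError inputs: unknown operators, rotations with value ≥ 90 on a
-- position missing "x" or "y", and translations on a position missing the touched coordinate.
def Pre_move_waypoint (operator : String) (value : Int) (position : List (String × Int)) : Prop :=
  if operator = "L" ∨ operator = "R" then
    90 ≤ value → ("x" ∈ position.map Prod.fst ∧ "y" ∈ position.map Prod.fst)
  else
    ((operator = "N" ∨ operator = "S") ∧ "y" ∈ position.map Prod.fst) ∨
    ((operator = "E" ∨ operator = "W") ∧ "x" ∈ position.map Prod.fst)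
instance (operator : String) (value : Int) (position : List (String × Int)) : Decidable (Pre_move_waypoint operator value position) := by unfold Pre_move_waypoint; infer_instance

def pvWitness_move_waypoint : String × Int × (List (String × Int)) := ("L", 180, [("x", 3), ("y", 4)])

def Spec_move_waypoint (operator : String) (value : Int) (position : List (String × Int)) (out : List (String × Int)) : Prop := out = move_waypoint_alt operator value position
instance (operator : String) (value : Int) (position : List (String × Int)) (out : List (String × Int)) : Decidable (Spec_move_waypoint operator value position out) := by unfold Spec_move_waypoint; infer_instance

-- ===== CLAIM (what is proved, stated in full; the proofs are below) =====
def Claim_equal_move_waypoint : Prop := ∀ (operator : String) (value : Int) (position : List (String × Int)), Dom_move_waypoint operator value position → Pre_move_waypoint operator value position → Spec_move_waypoint operator value position (move_waypoint operator value position)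

-- ===== LEMMAS AND PROOFS =====

-- quarter-turn on the coordinate pair, left / right
def rotL2 (p : Int × Int) : Int × Int := (-p.2, p.1)
def rotR2 (p : Int × Int) : Int × Int := (p.2, -p.1)

theorem pvLookup_cons (k₀ k : String) (v : Int) (t : List (String × Int)) :
    List.lookup k ((k₀, v) :: t) = if k = k₀ then some v else List.lookup k t := by
  rw [List.lookup_cons]
  by_cases h : k = k₀
  · simp [h]
  · rw [beq_eq_false_iff_ne.mpr h, if_neg h]

theorem lookup_pvSet_self (d : List (String × Int)) (k : String) (v : Int) :
    (pvSet d k v).lookup k = some v := by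
  induction d with
  | nil => simp [pvSet]
  | cons h t ih =>
    obtain ⟨k', v'⟩ := h
    by_cases hk : k' = k
    · subst hk; simp [pvSet]
    · simp [pvSet, hk, pvLookup_cons, ih, show ¬ k = k' from fun h => hk h.symm]

theorem lookup_pvSet_ne (d : List (String × Int)) {k k' : String} (v : Int) (h : k' ≠ k) :
    (pvSet d k v).lookup k' = d.lookup k' := by
  induction d with
  | nil => simp [pvSet, pvLookup_cons, h]
  | cons hd t ih =>
    obtain ⟨k₀, v₀⟩ := hd
    by_cases hk : k₀ = k
    · subst hk; simp [pvSet, pvLookup_cons, h]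
    · by_cases hk' : k₀ = k'
      · subst hk'; simp [pvSet, hk]
      · simp [pvSet, hk, pvLookup_cons, show ¬ k' = k₀ from fun e => hk' e.symm, ih]

theorem pvGet_pvSet_self (d : List (String × Int)) (k : String) (v : Int) :
    pvGet (pvSet d k v) k = v := by simp [pvGet, lookup_pvSet_self]

theorem pvGet_pvSet_ne (d : List (String × Int)) {k k' : String} (v : Int) (h : k' ≠ k) :
    pvGet (pvSet d k v) k' = pvGet d k' := by simp [pvGet, lookup_pvSet_ne d v h]

theorem pvSet_pvSet_self (d : List (String × Int)) (k : String) (a b : Int) :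
    pvSet (pvSet d k a) k b = pvSet d k b := by
  induction d with
  | nil => simp [pvSet]
  | cons h t ih =>
    obtain ⟨k₀, v₀⟩ := h
    by_cases hk : k₀ = k <;> simp [pvSet, hk, ih]

theorem mem_keys_pvSet (d : List (String × Int)) (k : String) (v : Int) {k' : String}
    (h : k' ∈ d.map Prod.fst) : k' ∈ (pvSet d k v).map Prod.fst := by
  induction d with
  | nil => simp at h
  | cons hd t ih =>
    obtain ⟨k₀, v₀⟩ := hd
    by_cases hk : k₀ = k
    · subst hk
      simp only [List.map_cons, List.mem_cons] at h
      rcases h with h | h <;> simp [pvSet, h]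
    · simp only [List.map_cons, List.mem_cons] at h
      rcases h with h | h
      · simp [pvSet, hk, h]
      · simp [pvSet, hk, ih h]

theorem mem_keys_pvSet_self (d : List (String × Int)) (k : String) (v : Int) :
    k ∈ (pvSet d k v).map Prod.fst := by
  induction d with
  | nil => simp [pvSet]
  | cons hd t ih =>
    obtain ⟨k₀, v₀⟩ := hd
    by_cases hk : k₀ = k <;> simp [pvSet, hk, ih]

theorem pvSet_comm (d : List (String × Int)) {k k' : String} (a b : Int)
    (hk : k ∈ d.map Prod.fst) (hne : k ≠ k') :
    pvSet (pvSet d k' b) k a = pvSet (pvSet d k a) k' b := by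
  induction d with
  | nil => simp at hk
  | cons hd t ih =>
    obtain ⟨k₀, v₀⟩ := hd
    by_cases h1 : k₀ = k
    · subst h1
      simp [pvSet, hne]
    · by_cases h2 : k₀ = k'
      · subst h2
        simp [pvSet, h1]
      · simp only [List.map_cons, List.mem_cons] at hk
        rcases hk with hk | hk
        · exact absurd hk.symm h1
        · simp [pvSet, h1, h2, ih hk]

theorem pvSet_lookup_self (d : List (String × Int)) {k : String}
    (h : k ∈ d.map Prod.fst) : pvSet d k (pvGet d k) = d := by
  induction d with
  | nil => simp at h
  | cons hd t ih =>
    obtain ⟨k₀, v₀⟩ := hd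
    by_cases h1 : k₀ = k
    · subst h1; simp [pvSet, pvGet]
    · simp only [List.map_cons, List.mem_cons] at h
      rcases h with h | h
      · exact absurd h.symm h1
      · have hgt : pvGet ((k₀, v₀) :: t) k = pvGet t k := by
          simp [pvGet, pvLookup_cons, show ¬ k = k₀ from fun e => h1 e.symm]
        simp [pvSet, h1, hgt, ih h]

-- the collapsing step: two consecutive x/y writes absorb the two earlier ones
theorem pvSet_absorb (d : List (String × Int)) (a b A B : Int) :
    pvSet (pvSet (pvSet (pvSet d "x" a) "y" b) "x" A) "y" B = pvSet (pvSet d "x" A) "y" B := by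
  have h1 : pvSet (pvSet (pvSet d "x" a) "y" b) "x" A
      = pvSet (pvSet (pvSet d "x" a) "x" A) "y" b :=
    pvSet_comm _ A b (mem_keys_pvSet_self d "x" a) (by decide)
  rw [h1, pvSet_pvSet_self, pvSet_pvSet_self]

theorem pvWhileL_char (n : Nat) : ∀ (d : List (String × Int)),
    pvWhileL (n + 1) d =
      pvSet (pvSet d "x" (rotL2^[n + 1] (pvGet d "x", pvGet d "y")).1) "y"
        (rotL2^[n + 1] (pvGet d "x", pvGet d "y")).2 := by
  induction n with
  | zero => intro d; simp [pvWhileL, rotL2]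
  | succ n ih =>
    intro d
    have step : pvWhileL (n + 2) d =
        pvWhileL (n + 1) (pvSet (pvSet d "x" (-(pvGet d "y"))) "y" (pvGet d "x")) := rfl
    set d' := pvSet (pvSet d "x" (-(pvGet d "y"))) "y" (pvGet d "x") with hd'
    have gx : pvGet d' "x" = -(pvGet d "y") := by
      rw [hd', pvGet_pvSet_ne _ _ (by decide), pvGet_pvSet_self]
    have gy : pvGet d' "y" = pvGet d "x" := by rw [hd', pvGet_pvSet_self]
    have hpair : (pvGet d' "x", pvGet d' "y") = rotL2 (pvGet d "x", pvGet d "y") := by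
      simp [gx, gy, rotL2]
    rw [step, ih d', hpair, hd',
      pvSet_absorb, ← Function.iterate_succ_apply]

theorem pvWhileR_char (n : Nat) : ∀ (d : List (String × Int)),
    pvWhileR (n + 1) d =
      pvSet (pvSet d "x" (rotR2^[n + 1] (pvGet d "x", pvGet d "y")).1) "y"
        (rotR2^[n + 1] (pvGet d "x", pvGet d "y")).2 := by
  induction n with
  | zero => intro d; simp [pvWhileR, rotR2]
  | succ n ih =>
    intro d
    have step : pvWhileR (n + 2) d =
        pvWhileR (n + 1) (pvSet (pvSet d "x" (pvGet d "y")) "y" (-(pvGet d "x"))) := rfl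
    set d' := pvSet (pvSet d "x" (pvGet d "y")) "y" (-(pvGet d "x")) with hd'
    have gx : pvGet d' "x" = pvGet d "y" := by
      rw [hd', pvGet_pvSet_ne _ _ (by decide), pvGet_pvSet_self]
    have gy : pvGet d' "y" = -(pvGet d "x") := by rw [hd', pvGet_pvSet_self]
    have hpair : (pvGet d' "x", pvGet d' "y") = rotR2 (pvGet d "x", pvGet d "y") := by
      simp [gx, gy, rotR2]
    rw [step, ih d', hpair, hd',
      pvSet_absorb, ← Function.iterate_succ_apply]

theorem iterate_mod_four {f : Int × Int → Int × Int} (h4 : ∀ p, f^[4] p = p) :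
    ∀ (n : Nat) (p : Int × Int), f^[n] p = f^[n % 4] p := by
  intro n
  induction n using Nat.strong_induction_on with
  | _ n ih =>
    intro p
    by_cases hlt : n < 4
    · rw [Nat.mod_eq_of_lt hlt]
    · have h : n = (n - 4) + 4 := by omega
      rw [h, Function.iterate_add_apply, h4, ih (n - 4) (by omega)]
      congr 1
      omega

theorem rotL2_four (p : Int × Int) : rotL2^[4] p = p := by
  obtain ⟨x, y⟩ := p; simp [rotL2, Function.iterate_succ_apply]

theorem rotR2_four (p : Int × Int) : rotR2^[4] p = p := by
  obtain ⟨x, y⟩ := p; simp [rotR2, Function.iterate_succ_apply]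

-- the identity rotation (n ≡ 0 mod 4) leaves the dict literally unchanged
theorem pvSet_id (d : List (String × Int)) (hx : "x" ∈ d.map Prod.fst)
    (hy : "y" ∈ d.map Prod.fst) :
    pvSet (pvSet d "x" (pvGet d "x")) "y" (pvGet d "y") = d := by
  have hy' : "y" ∈ (pvSet d "x" (pvGet d "x")).map Prod.fst := mem_keys_pvSet _ _ _ hy
  have : pvGet d "y" = pvGet (pvSet d "x" (pvGet d "x")) "y" :=
    (pvGet_pvSet_ne d _ (by decide)).symm
  rw [this, pvSet_lookup_self _ hy', pvSet_lookup_self _ hx]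

-- ===== VERDICT (by name: the statement is the Claim_ definition above) =====
theorem move_waypoint_spec : Claim_equal_move_waypoint := by
  intro operator value position _ hpre
  unfold Spec_move_waypoint move_waypoint move_waypoint_alt
  unfold Pre_move_waypoint at hpre
  by_cases hLR : operator = "L" ∨ operator = "R"
  · rw [if_pos hLR] at hpre ⊢
    set r := PySem.Int.floordiv value 90 with hr
    by_cases hpos : r > 0
    · have hval : 90 ≤ value := by
        have := (PySem.Int.le_floordiv_iff_mul_le (a := value) (b := 90) (q := 1) (by omega)).mp
          (by omega)
        omega
      obtain ⟨hx, hy⟩ := hpre hval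
      set n := r.toNat with hn
      have hnpos : 0 < n := by omega
      obtain ⟨m, hm⟩ : ∃ m, n = m + 1 := ⟨n - 1, by omega⟩
      have hrn : r = (n : Int) := by omega
      have hmod4 : n % 4 < 4 := Nat.mod_lt _ (by omega)
      rcases hLR with hop | hop
      · -- operator = "L"
        rw [hop]
        simp only [reduceIte, if_pos hpos]
        rw [hm, pvWhileL_char m position, ← hm]
        rw [iterate_mod_four rotL2_four n]
        have hk : PySem.Int.mod r 4 = ((n % 4 : Nat) : Int) := by
          rw [PySem.Int.mod_eq_emod_of_pos (by omega), hrn]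
          omega
        rw [hk]
        interval_cases h : n % 4
        · simp only [Function.iterate_zero, id_eq]
          norm_num
          exact pvSet_id position hx hy
        · norm_num [rotL2, Function.iterate_succ_apply]
        · norm_num [rotL2, Function.iterate_succ_apply]
        · norm_num [rotL2, Function.iterate_succ_apply]
      · -- operator = "R"
        rw [hop]
        simp only [String.reduceEq, reduceIte, if_pos hpos]
        rw [hm, pvWhileR_char m position, ← hm]
        rw [iterate_mod_four rotR2_four n]
        have hk : PySem.Int.mod (-r) 4 = (((4 - n % 4) % 4 : Nat) : Int) := by
          rw [PySem.Int.mod_eq_emod_of_pos (by omega), hrn]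
          omega
        rw [hk]
        interval_cases h : n % 4
        · simp only [Function.iterate_zero, id_eq]
          norm_num
          exact pvSet_id position hx hy
        · norm_num [rotR2, Function.iterate_succ_apply]
        · norm_num [rotR2, Function.iterate_succ_apply]
        · norm_num [rotR2, Function.iterate_succ_apply]
    · -- repeat ≤ 0: the loop never runs, B's guard fails
      have hn0 : r.toNat = 0 := by omega
      rcases hLR with hop | hop <;>
        simp [hop, hn0, hpos, pvWhileL, pvWhileR]
  · -- translation branch: identical code on both sides
    have hL : ¬ operator = "L" := fun h => hLR (Or.inl h)
    have hR : ¬ operator = "R" := fun h => hLR (Or.inr h)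
    rw [if_neg hL, if_neg hR, if_neg hLR]
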